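-- pv_equiv track=rewrite | github.com/kusterlab/curve_curator | curve_curator/search_engine_outputs/ProteomeDiscoverer.py | to_mod_seq
-- ===== SOURCE A (Python) =====
-- def to_mod_seq(row):
--     """
--     creates a modified sequence string based on the input
--     """
--     seq, mod_dict = row
--     mod_seq = []
--     n = len(seq)
--     i = 0
--     for p, mod in sorted(mod_dict.items()):
--         mod_seq.append(seq[i:p])
--         mod_seq.append(f'({mod})')
--         i = p
--     mod_seq.append(seq[i:n])
--     return ''.join(mod_seq)
-- ===== SOURCE B (Python) =====
-- def to_mod_seq(row):
--     """
--     creates a modified sequence string based on the input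
--     """
--     seq, mod_dict = row
--     n = len(seq)
--     slots = {}
--     for p, mod in mod_dict.items():
--         slots.setdefault(min(p, n), []).append((p, mod))
--     out = []
--     for j in range(n + 1):
--         for _, mod in sorted(slots.get(j, [])):
--             out.append(f'({mod})')
--         if j < n:
--             out.append(seq[j])
--     return ''.join(out)
-- ===== Notes on version B (the rewrite author's own statement) =====
-- stated objective: alternative
-- what changed: Replaces A's sort of the modification items followed by slicing the sequence between consecutive positions with bucketing each tag under its clamped slot min(p, n) in a position-indexed dict and then walking the string character by character, emitting a slot's tags before each character. Pre_ excludes negative modification positions, where A's Python slice wraparound duplicates characters accidentally (B drops such a tag); the Nodup conjunct of Pre_ is just the unique-keys invariant every association list encoding a Python dict satisfies.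
-- outside the precondition, e.g. on to_mod_seq(('AB', {-1: 'x'})): A returns 'A(x)B', B returns 'AB'
import Mathlib
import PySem

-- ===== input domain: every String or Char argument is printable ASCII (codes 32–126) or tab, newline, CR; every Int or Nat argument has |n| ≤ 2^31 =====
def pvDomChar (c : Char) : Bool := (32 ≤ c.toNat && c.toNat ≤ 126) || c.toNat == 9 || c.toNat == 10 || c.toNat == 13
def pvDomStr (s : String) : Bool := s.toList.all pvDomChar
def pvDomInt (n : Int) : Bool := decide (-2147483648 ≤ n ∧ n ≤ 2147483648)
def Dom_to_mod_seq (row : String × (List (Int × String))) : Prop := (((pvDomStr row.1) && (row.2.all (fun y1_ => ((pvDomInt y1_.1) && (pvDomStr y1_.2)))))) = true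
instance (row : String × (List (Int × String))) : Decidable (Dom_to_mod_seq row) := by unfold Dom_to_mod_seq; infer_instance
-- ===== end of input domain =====

-- B replaces A's sort-then-slice over the modification items by bucketing tags under their clamped
-- slot min(p, n) and walking the string character by character; equal on Pre_ (no negative positions).

-- the f-string '({mod})' as a char list (used by both ports)
def pvTag (m : String) : List Char := ('(' :: m.toList) ++ [')']

-- ===== PORT A =====
-- A: sort the items, forward loop with cursor i appending seq[i:p] and '(mod)' to a piece list, final seq[i:n]; join.
def to_mod_seq (row : String × (List (Int × String))) : String :=
  let seq := row.1.toList
  let n : Int := seq.length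
  let st := (PySem.List.sorted2 row.2 (fun x => x.1) (fun x => x.2)).foldl
      (fun (a : List (List Char) × Int) pm =>
        (a.1 ++ [PySem.List.slice seq (some a.2) (some pm.1)] ++ [pvTag pm.2], pm.1))
      ([], 0)
  String.ofList ((st.1 ++ [PySem.List.slice seq (some st.2) (some n)]).flatten)

-- ===== PORT B =====
-- B's loop body for one position j: "for _, mod in sorted(slots.get(j, [])): out.append(f'({mod})')"
-- (Python sorts the (p, mod) pairs of a slot, i.e. by position then text), then
-- "if j < n: out.append(seq[j])"; pyGetD is exact there since 0 ≤ j < n in that branch.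
def pvSlotTags (slots : PySem.Dict Int (List (Int × String)))
    (acc : List (List Char)) (j : Int) : List (List Char) :=
  (PySem.List.sorted2 (slots.getD j []) (fun x => x.1) (fun x => x.2)).foldl
      (fun a pm => a ++ [pvTag pm.2]) acc
def pvSlotStep (seq : List Char) (slots : PySem.Dict Int (List (Int × String)))
    (acc : List (List Char)) (j : Int) : List (List Char) :=
  if j < (seq.length : Int) then pvSlotTags slots acc j ++ [[PySem.List.pyGetD seq j '?']]
  else pvSlotTags slots acc j

-- B: bucket each (p, mod) under slot min(p, n) ('slots.setdefault(min(p, n), []).append((p, mod))'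
-- is Dict.modify with default []), then walk j = 0..n emitting a slot's tags and the character at j.
def to_mod_seq_alt (row : String × (List (Int × String))) : String :=
  let seq := row.1.toList
  let n : Int := seq.length
  let slots := row.2.foldl
      (fun s pm => s.modify (min pm.1 n) [] (fun b => b ++ [pm])) PySem.Dict.empty
  let parts := (PySem.List.pyRange 0 (n + 1)).foldl (pvSlotStep seq slots) []
  String.ofList parts.flatten

-- ===== PRECONDITION & SPEC =====
-- Pre_ excludes negative modification positions, where A's Python slice wraparound duplicates
-- characters accidentally (B drops such a tag); the Nodup conjunct is just the dict's
-- unique-keys invariant, which every association list encoding a Python dict satisfies.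
def Pre_to_mod_seq (row : String × (List (Int × String))) : Prop :=
  (row.2.map (fun pm => pm.1)).Nodup ∧ ∀ pm ∈ row.2, (0 : Int) ≤ pm.1
instance (row : String × (List (Int × String))) : Decidable (Pre_to_mod_seq row) := by
  unfold Pre_to_mod_seq; infer_instance

def pvWitness_to_mod_seq : (String × (List (Int × String))) := ("PEPTIDE", [(3, "ph"), (0, "ac")])

def Spec_to_mod_seq (row : String × (List (Int × String))) (out : String) : Prop := out = to_mod_seq_alt row
instance (row : String × (List (Int × String))) (out : String) : Decidable (Spec_to_mod_seq row out) := by unfold Spec_to_mod_seq; infer_instance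

-- ===== CLAIM (what is proved, stated in full; the proofs are below) =====
def Claim_equal_to_mod_seq : Prop := ∀ (row : String × (List (Int × String))), Dom_to_mod_seq row → Pre_to_mod_seq row → Spec_to_mod_seq row (to_mod_seq row)

-- ===== LEMMAS AND PROOFS =====

-- the common value of both programs: chars from cursor c, each item contributing its gap and tag
def pvSpine (seq : List Char) : Int → List (Int × String) → List Char
  | c, [] => seq.drop c.toNat
  | c, (p, m) :: rest => ((seq.drop c.toNat).take (p - c).toNat) ++ pvTag m ++ pvSpine seq p rest

theorem pv_slice_eq_drop_take (seq : List Char) (c p : Int) (hc : 0 ≤ c) (hp : 0 ≤ p) :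
    PySem.List.slice seq (some c) (some p) = (seq.drop c.toNat).take (p - c).toNat := by
  have h1 : c = ((c.toNat : Nat) : Int) := by omega
  have h2 : p = ((p.toNat : Nat) : Int) := by omega
  rw [h1, h2, PySem.List.slice_natCast]
  congr 1
  omega

theorem pv_insertBy_congr {a : Type} (b b' : a → a → Bool) (x : a) (ys : List a)
    (h : ∀ y ∈ ys, b x y = b' x y) :
    PySem.List.insertBy b x ys = PySem.List.insertBy b' x ys := by
  induction ys with
  | nil => rfl
  | cons y ys ih =>
      have hy := h y (by simp)
      simp only [PySem.List.insertBy, hy]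
      by_cases hb : b' x y = true
      · simp [hb]
      · simp [hb, ih (fun z hz => h z (by simp [hz]))]

-- sorted2's comparator agrees with sorted's on pairs drawn from a list with distinct first keys
theorem pv_foldl_insertBy_congr {a : Type} (b2 b1 : a → a → Bool) (xs : List a)
    (hagree : ∀ x ∈ xs, ∀ y ∈ xs, b2 x y = b1 x y) :
    ∀ (l acc : List a), (∀ z ∈ l, z ∈ xs) → (∀ z ∈ acc, z ∈ xs) →
    List.foldl (fun acc x => PySem.List.insertBy b2 x acc) acc l
      = List.foldl (fun acc x => PySem.List.insertBy b1 x acc) acc l := by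
  intro l
  induction l with
  | nil => intro acc _ _; rfl
  | cons x t ih =>
      intro acc hl hacc
      simp only [List.foldl_cons]
      rw [pv_insertBy_congr b2 b1 x acc (fun y hy => hagree x (hl x (by simp)) y (hacc y hy))]
      refine ih _ (fun z hz => hl z (by simp [hz])) (fun z hz => ?_)
      rcases (PySem.List.mem_insertBy b1 x z acc).mp hz with h | h
      · exact h ▸ hl x (by simp)
      · exact hacc z h

-- with pairwise-distinct first keys the tuple sort is the key-only sort
theorem pv_sorted2_eq_sorted (xs : List (Int × String))
    (hnd : (xs.map (fun pm => pm.1)).Nodup) :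
    PySem.List.sorted2 xs (fun x => x.1) (fun x => x.2) = PySem.List.sorted xs (fun x => x.1) := by
  show List.foldl _ [] xs = List.foldl _ [] xs
  refine pv_foldl_insertBy_congr _ _ xs ?_ xs [] (fun z hz => hz) (by simp)
  intro x hx y hy
  by_cases h1 : x.1 < y.1
  · simp [h1]
  · by_cases h2 : y.1 < x.1
    · simp [h1, h2]
    · have hxy : x = y := List.inj_on_of_nodup_map hnd hx hy (by omega)
      subst hxy
      simp
-- the key-only sort of a distinct-keys list is strictly increasing in the key
theorem pv_sorted_pairwise_lt (xs : List (Int × String))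
    (hnd : (xs.map (fun pm => pm.1)).Nodup) :
    (PySem.List.sorted xs (fun x => x.1)).Pairwise (fun x y => x.1 < y.1) := by
  have hperm : (PySem.List.sorted xs (fun x => x.1)).Perm xs :=
    PySem.List.sorted_perm xs (fun x => x.1) false
  have hndi : ((PySem.List.sorted xs (fun x => x.1)).map (fun pm => pm.1)).Nodup :=
    ((hperm.map (fun pm => pm.1)).nodup_iff).mpr hnd
  have h1 := PySem.List.sorted_pairwise xs (fun x => x.1)
  have h2 : (PySem.List.sorted xs (fun x => x.1)).Pairwise (fun x y => x.1 ≠ y.1) :=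
    List.pairwise_map.mp hndi
  exact (h1.and h2).imp (fun h => lt_of_le_of_ne h.1 h.2)

-- sorting commutes with filtering (distinct first keys)
theorem pv_sorted2_filter (l : List (Int × String))
    (hnd : (l.map (fun pm => pm.1)).Nodup) (q : (Int × String) → Bool) :
    PySem.List.sorted2 (l.filter q) (fun x => x.1) (fun x => x.2)
      = (PySem.List.sorted2 l (fun x => x.1) (fun x => x.2)).filter q := by
  have hsub : ((l.filter q).map (fun pm => pm.1)).Sublist (l.map (fun pm => pm.1)) :=
    List.Sublist.map _ List.filter_sublist
  rw [pv_sorted2_eq_sorted _ (hnd.sublist hsub), pv_sorted2_eq_sorted _ hnd]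
  refine PySem.List.sorted_eq_of_perm_of_pairwise_lt (l.filter q)
    ((PySem.List.sorted l (fun x => x.1)).filter q) (fun x => x.1) ?_ ?_
  · exact (PySem.List.sorted_perm l (fun x => x.1) false).filter q
  · exact (pv_sorted_pairwise_lt l hnd).filter q

-- the bucket-building loop, slot by slot
theorem pv_getD_buckets (n : Int) (l : List (Int × String))
    (d : PySem.Dict Int (List (Int × String))) (c : Int) :
    (l.foldl (fun s pm => s.modify (min pm.1 n) [] (fun b => b ++ [pm])) d).getD c []
      = d.getD c [] ++ l.filter (fun pm => min pm.1 n == c) := by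
  induction l generalizing d with
  | nil => simp
  | cons pm t ih =>
      simp only [List.foldl_cons, List.filter_cons]
      rw [ih, PySem.Dict.getD_modify]
      by_cases h : min pm.1 n = c
      · simp [h]
      · rw [if_neg (fun hc : c = min pm.1 n => h hc.symm), if_neg (by simp [h])]

-- the characters at positions c..p-1, read one by one
theorem pv_map_pyGetD_seg (seq : List Char) (d : Char) (c p : Int)
    (h0 : 0 ≤ c) (_hcp : c ≤ p) (hp : p ≤ (seq.length : Int)) :
    (PySem.List.pyRange c p).map (fun j => PySem.List.pyGetD seq j d)
      = (seq.drop c.toNat).take (p - c).toNat := by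
  rw [PySem.List.pyRange_one, List.map_map]
  refine List.ext_getElem (by simp; omega) ?_
  intro k h1 h2
  simp only [List.length_map, List.length_range] at h1
  simp only [List.getElem_map, List.getElem_range, Function.comp]
  rw [PySem.List.pyGetD_eq_getElem seq d (by omega) (by omega)]
  rw [List.getElem_take, List.getElem_drop]
  congr 1
  omega

-- a stretch of positions with empty slots only copies characters
theorem pv_bwalk_skip (seq : List Char) (slots : PySem.Dict Int (List (Int × String)))
    (c e : Int) (acc : List (List Char)) (h0 : 0 ≤ c) (hce : c ≤ e)
    (he : e ≤ (seq.length : Int))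
    (hS : ∀ j, c ≤ j → j < e →
      PySem.List.sorted2 (slots.getD j []) (fun x => x.1) (fun x => x.2) = []) :
    (PySem.List.pyRange c e).foldl (pvSlotStep seq slots) acc
      = acc ++ ((seq.drop c.toNat).take (e - c).toNat).map (fun ch => [ch]) := by
  have hcongr : ∀ (a : List (List Char)), ∀ j ∈ PySem.List.pyRange c e,
      pvSlotStep seq slots a j = a ++ [[PySem.List.pyGetD seq j '?']] := by
    intro a j hj
    rw [PySem.List.mem_pyRange_one] at hj
    unfold pvSlotStep pvSlotTags
    rw [hS j hj.1 (by omega)]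
    simp only [List.foldl_nil]
    rw [if_pos (by omega)]
  rw [PySem.List.foldl_congr_mem _ _ (fun a j => a ++ [[PySem.List.pyGetD seq j '?']]) acc hcongr]
  rw [PySem.List.foldl_append_singleton_eq_map (fun j => [PySem.List.pyGetD seq j '?'])]
  congr 1
  rw [← pv_map_pyGetD_seg seq '?' c e h0 hce he, List.map_map]
  rfl

-- consuming the character at p shifts the spine cursor by one
theorem pv_spine_step (seq : List Char) (p : Int) (rest : List (Int × String))
    (h0 : 0 ≤ p) (hp : p < (seq.length : Int))
    (hrest : ∀ pm ∈ rest, p + 1 ≤ pm.1) :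
    pvSpine seq p rest = PySem.List.pyGetD seq p '?' :: pvSpine seq (p + 1) rest := by
  have hlt : p.toNat < seq.length := by omega
  have hget : PySem.List.pyGetD seq p '?' = seq[p.toNat] :=
    PySem.List.pyGetD_eq_getElem seq '?' h0 hp
  have hsucc : (p + 1).toNat = p.toNat + 1 := by omega
  cases rest with
  | nil =>
      simp only [pvSpine]
      rw [List.drop_eq_getElem_cons hlt, hget, hsucc]
  | cons qm r =>
      obtain ⟨q, m⟩ := qm
      have hq : p + 1 ≤ q := hrest (q, m) (by simp)
      simp only [pvSpine]
      rw [List.drop_eq_getElem_cons hlt]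
      have h1 : (q - p).toNat = (q - (p + 1)).toNat + 1 := by omega
      rw [h1, List.take_succ_cons, hget, hsucc]
      simp

-- past the end of the string the spine is just the concatenated tags
theorem pv_spine_tail (seq : List Char) :
    ∀ (l : List (Int × String)) (c : Int), (seq.length : Int) ≤ c →
    (∀ pm ∈ l, (seq.length : Int) ≤ pm.1) →
    pvSpine seq c l = l.flatMap (fun pm => pvTag pm.2) := by
  intro l
  induction l with
  | nil =>
      intro c hc _
      simp only [pvSpine, List.flatMap_nil]
      exact List.drop_of_length_le (by omega)
  | cons pm t ih =>
      intro c hc hl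
      obtain ⟨p, m⟩ := pm
      have hp : (seq.length : Int) ≤ p := hl (p, m) (by simp)
      simp only [pvSpine, List.flatMap_cons]
      rw [List.drop_of_length_le (show seq.length ≤ c.toNat by omega), List.take_nil]
      rw [ih p hp (fun x hx => hl x (by simp [hx]))]
      simp

-- A's loop invariant: pieces so far ++ final slice = the spine from the cursor
theorem pv_afold (seq : List Char) :
    ∀ (l : List (Int × String)) (c : Int) (acc : List (List Char)),
    0 ≤ c → (∀ pm ∈ l, c ≤ pm.1) → l.Pairwise (fun x y => x.1 < y.1) →
    ((l.foldl (fun (a : List (List Char) × Int) pm =>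
        (a.1 ++ [PySem.List.slice seq (some a.2) (some pm.1)] ++ [pvTag pm.2], pm.1)) (acc, c)).1
      ++ [PySem.List.slice seq
        (some (l.foldl (fun (a : List (List Char) × Int) pm =>
          (a.1 ++ [PySem.List.slice seq (some a.2) (some pm.1)] ++ [pvTag pm.2], pm.1)) (acc, c)).2)
        (some (seq.length : Int))]).flatten
      = acc.flatten ++ pvSpine seq c l := by
  intro l
  induction l with
  | nil =>
      intro c acc h0 _ _
      simp only [List.foldl_nil, pvSpine, List.flatten_append, List.flatten_cons, List.flatten_nil]
      rw [pv_slice_eq_drop_take seq c _ h0 (Int.natCast_nonneg _)]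
      rw [List.take_of_length_le (by simp; omega)]
      simp
  | cons pm rest ih =>
      intro c acc h0 hb hp
      obtain ⟨p, m⟩ := pm
      have hcp : c ≤ p := hb (p, m) (by simp)
      have hp' := List.pairwise_cons.mp hp
      simp only [List.foldl_cons]
      rw [ih p _ (by omega) (fun x hx => le_of_lt (hp'.1 x hx)) hp'.2]
      rw [pv_slice_eq_drop_take seq c p h0 (by omega)]
      simp [pvSpine]

-- B's loop invariant: walking positions c..n against the remaining sorted items builds the spine
theorem pv_bwalk (seq : List Char) (slots : PySem.Dict Int (List (Int × String))) :
    ∀ (l : List (Int × String)) (c : Int) (acc : List (List Char)),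
    0 ≤ c → c ≤ (seq.length : Int) →
    (∀ pm ∈ l, c ≤ pm.1) → l.Pairwise (fun x y => x.1 < y.1) →
    (∀ j, c ≤ j → j ≤ (seq.length : Int) →
      PySem.List.sorted2 (slots.getD j []) (fun x => x.1) (fun x => x.2)
        = l.filter (fun pm => min pm.1 (seq.length : Int) == j)) →
    ((PySem.List.pyRange c ((seq.length : Int) + 1)).foldl (pvSlotStep seq slots) acc).flatten
      = acc.flatten ++ pvSpine seq c l := by
  intro l
  induction l with
  | nil =>
      intro c acc h0 hc _ _ hS
      rw [PySem.List.pyRange_one_append c (seq.length : Int) ((seq.length : Int) + 1) hc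
        (by omega), List.foldl_append]
      rw [pv_bwalk_skip seq slots c _ acc h0 hc (le_refl _)
        (fun j hj hjl => by rw [hS j hj (by omega)]; simp)]
      rw [PySem.List.pyRange_one_cons (by omega : (seq.length : Int) < (seq.length : Int) + 1),
        PySem.List.pyRange_one_eq_nil (le_refl _), List.foldl_cons, List.foldl_nil]
      unfold pvSlotStep pvSlotTags
      rw [if_neg (by omega), hS _ hc (le_refl _)]
      simp only [List.filter_nil, List.foldl_nil]
      rw [List.take_of_length_le (by simp; omega)]
      simp only [pvSpine, List.flatten_append]
      rw [← List.flatMap_def, List.flatMap_singleton']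
  | cons pm rest ih =>
      intro c acc h0 hc hb hp hS
      obtain ⟨p, m⟩ := pm
      have hcp : c ≤ p := hb (p, m) (by simp)
      have hp' := List.pairwise_cons.mp hp
      by_cases hpn : p < (seq.length : Int)
      · rw [PySem.List.pyRange_one_append c p ((seq.length : Int) + 1) hcp (by omega),
          List.foldl_append]
        rw [pv_bwalk_skip seq slots c p acc h0 hcp (by omega) (fun j hj hjp => by
          rw [hS j hj (by omega)]
          refine List.filter_eq_nil_iff.mpr (fun x hx => ?_)
          rcases List.mem_cons.mp hx with hx | hx
          · subst hx; simp; omega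
          · have := hp'.1 x hx; simp; omega)]
        rw [PySem.List.pyRange_one_cons (by omega : p < (seq.length : Int) + 1), List.foldl_cons]
        have hfilter : ((p, m) :: rest).filter
            (fun pm => min pm.1 (seq.length : Int) == p) = [(p, m)] := by
          have hrestnil : rest.filter (fun pm => min pm.1 (seq.length : Int) == p) = [] :=
            List.filter_eq_nil_iff.mpr (fun x hx => by have := hp'.1 x hx; simp; omega)
          rw [List.filter_cons, if_pos (show (min p (seq.length : Int) == p) = true by
            simp; omega), hrestnil]
        have hstep : pvSlotStep seq slots
            (acc ++ ((seq.drop c.toNat).take (p - c).toNat).map (fun ch => [ch])) p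
            = (acc ++ ((seq.drop c.toNat).take (p - c).toNat).map (fun ch => [ch])
                ++ [pvTag m]) ++ [[PySem.List.pyGetD seq p '?']] := by
          unfold pvSlotStep pvSlotTags
          rw [if_pos hpn, hS p hcp (by omega), hfilter]
          simp only [List.foldl_cons, List.foldl_nil]
        rw [hstep]
        rw [ih (p + 1) _ (by omega) (by omega)
          (fun x hx => by have := hp'.1 x hx; omega) hp'.2
          (fun j hj hjl => by
            rw [hS j (by omega) hjl, List.filter_cons,
              if_neg (by simp only [beq_iff_eq]; omega)])]
        simp only [pvSpine]
        rw [pv_spine_step seq p rest (by omega) hpn (fun x hx => by have := hp'.1 x hx; omega)]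
        simp only [List.flatten_append, List.flatten_cons, List.flatten_nil]
        rw [← List.flatMap_def, List.flatMap_singleton']
        simp
      · have hkeys : ∀ x ∈ (p, m) :: rest, (seq.length : Int) ≤ x.1 := by
          intro x hx
          rcases List.mem_cons.mp hx with hx | hx
          · subst hx; omega
          · have := hp'.1 x hx; omega
        rw [PySem.List.pyRange_one_append c (seq.length : Int) ((seq.length : Int) + 1) hc
          (by omega), List.foldl_append]
        rw [pv_bwalk_skip seq slots c _ acc h0 hc (le_refl _) (fun j hj hjl => by
          rw [hS j hj (by omega)]
          refine List.filter_eq_nil_iff.mpr (fun x hx => ?_)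
          have := hkeys x hx; simp; omega)]
        rw [PySem.List.pyRange_one_cons (by omega : (seq.length : Int) < (seq.length : Int) + 1),
          PySem.List.pyRange_one_eq_nil (le_refl _), List.foldl_cons, List.foldl_nil]
        unfold pvSlotStep pvSlotTags
        rw [if_neg (by omega), hS _ hc (le_refl _)]
        rw [List.filter_eq_self.mpr (fun x hx => by have := hkeys x hx; simp; omega)]
        rw [PySem.List.foldl_append_singleton_eq_map (fun pm : Int × String => pvTag pm.2)]
        rw [List.take_of_length_le (by simp; omega)]
        simp only [pvSpine, List.flatten_append]
        rw [← List.flatMap_def, List.flatMap_singleton', ← List.flatMap_def]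
        rw [pv_spine_tail seq rest p (by omega) (fun x hx => hkeys x (by simp [hx]))]
        have htake : ((seq.drop c.toNat).take (p - c).toNat) = seq.drop c.toNat :=
          List.take_of_length_le (by simp; omega)
        rw [htake]
        simp

-- ===== VERDICT (by name: the statement is the Claim_ definition above) =====
theorem to_mod_seq_spec : Claim_equal_to_mod_seq := by
  intro row _ hpre
  obtain ⟨hnd, hb⟩ := hpre
  show to_mod_seq row = to_mod_seq_alt row
  unfold to_mod_seq to_mod_seq_alt
  simp only []
  rw [pv_sorted2_eq_sorted row.2 hnd]
  have hperm : (PySem.List.sorted row.2 (fun x => x.1)).Perm row.2 :=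
    PySem.List.sorted_perm row.2 (fun x => x.1) false
  have hpair : (PySem.List.sorted row.2 (fun x => x.1)).Pairwise (fun x y => x.1 < y.1) :=
    pv_sorted_pairwise_lt row.2 hnd
  have hbs : ∀ pm ∈ PySem.List.sorted row.2 (fun x => x.1), (0 : Int) ≤ pm.1 := by
    intro pm hpm
    exact hb pm ((PySem.List.mem_sorted row.2 (fun x => x.1) false pm).mp hpm)
  have hS : ∀ j : Int, (0 : Int) ≤ j → j ≤ (row.1.toList.length : Int) →
      PySem.List.sorted2 ((row.2.foldl (fun s pm =>
          s.modify (min pm.1 (row.1.toList.length : Int)) [] (fun b => b ++ [pm]))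
          PySem.Dict.empty).getD j []) (fun x => x.1) (fun x => x.2)
        = (PySem.List.sorted row.2 (fun x => x.1)).filter
            (fun pm => min pm.1 (row.1.toList.length : Int) == j) := by
    intro j _ _
    rw [pv_getD_buckets, PySem.Dict.getD_empty, List.nil_append]
    rw [pv_sorted2_filter row.2 hnd, pv_sorted2_eq_sorted row.2 hnd]
  rw [pv_afold row.1.toList (PySem.List.sorted row.2 (fun x => x.1)) 0 [] (le_refl 0) hbs hpair]
  rw [pv_bwalk row.1.toList _ (PySem.List.sorted row.2 (fun x => x.1)) 0 [] (le_refl 0)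
      (by simp) hbs hpair hS]
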